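-- pv_equiv track=rewrite | github.com/ontodev/gadget | gadget/extract.py | get_bottom_descendants
-- ===== SOURCE A (Python) =====
-- def get_bottom_descendants(hierarchy: dict, term_id: str, descendants: set = None) -> set:
--     """Get all bottom-level descendants for a given term with no intermediates. The bottom-level
--     terms are those that are not ever used as the object of an rdfs:subClassOf statement.
--
--     :param hierarchy: dict containing child->parent relationships
--     :param term_id: term ID to get the bottom descendants of (recursive)
--     :param descendants: a set to add descendants to
--     :return set of bottom-level descendants
--     """
--     if not descendants:
--         descendants = set()
--     children = hierarchy.get(term_id)
--     if not children:
--         descendants.add(term_id)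
--     else:
--         for c in children:
--             descendants.update(get_bottom_descendants(hierarchy, c, descendants=descendants))
--     return descendants
-- ===== SOURCE B (Python) =====
-- def get_bottom_descendants(hierarchy: dict, term_id: str, descendants: set = None) -> set:
--     """Iterative DFS with a visited set: every term is expanded at most once, so shared
--     subtrees of the hierarchy are expanded only once.  Returns a fresh set (it does not
--     mutate the caller's `descendants` set in place the way the recursive version does)."""
--     result = set(descendants) if descendants else set()
--     visited = set()
--     stack = [term_id]
--     while stack:
--         t = stack.pop()
--         if t in visited:
--             continue
--         visited.add(t)
--         children = hierarchy.get(t)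
--         if not children:
--             result.add(t)
--         else:
--             stack.extend(reversed(children))
--     return result
-- ===== Notes on version B (the rewrite author's own statement) =====
-- stated objective: alternative
-- what changed: Replaced the naive recursion, which re-expands a shared subtree once per path reaching it, by an iterative DFS over an explicit stack with a visited set so every term is expanded at most once; B also returns a fresh set instead of mutating the caller's descendants set in place.
-- crash fix: On hierarchies with a cycle reachable from term_id, A raises RecursionError (unbounded recursion) while B's visited set makes it terminate and return the bottom-level descendants found (plus the initial descendants). — e.g. on get_bottom_descendants([("a", ["a"])], "a", none): A raises RecursionError, B returns []
import Mathlib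
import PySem

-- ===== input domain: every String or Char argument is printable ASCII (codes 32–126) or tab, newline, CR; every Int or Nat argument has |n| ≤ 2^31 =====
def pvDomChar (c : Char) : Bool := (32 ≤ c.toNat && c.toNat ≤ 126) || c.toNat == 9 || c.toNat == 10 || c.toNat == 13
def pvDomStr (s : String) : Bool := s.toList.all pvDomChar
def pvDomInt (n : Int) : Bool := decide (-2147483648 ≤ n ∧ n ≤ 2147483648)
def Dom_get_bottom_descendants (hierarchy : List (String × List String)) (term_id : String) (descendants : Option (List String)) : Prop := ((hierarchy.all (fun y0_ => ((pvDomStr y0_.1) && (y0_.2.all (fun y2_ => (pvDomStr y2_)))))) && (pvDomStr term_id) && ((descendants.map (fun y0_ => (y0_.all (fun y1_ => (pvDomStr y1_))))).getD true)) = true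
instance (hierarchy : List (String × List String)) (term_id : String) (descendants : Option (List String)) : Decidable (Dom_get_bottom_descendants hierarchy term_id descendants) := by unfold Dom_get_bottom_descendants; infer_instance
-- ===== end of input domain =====

-- B replaces A's naive recursion (re-expands shared subtrees once per path) by an iterative
-- DFS with a visited set (each term expanded at most once).  Equivalence is about the RETURN
-- value only: Python A mutates a non-empty caller-supplied `descendants` set in place, B
-- builds a fresh set (stated in Source B and claim.json).

-- ===== PORT A =====
-- `children = hierarchy.get(term_id)`; `if not children` is true for None and for [] alike:
def pvChildren (hierarchy : List (String × List String)) (t : String) : List String :=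
  ((PySem.Dict.mk hierarchy).get? t).getD []

-- Python A is an unbounded recursion; the Nat fuel only makes it total (the `0` case is
-- never reached under Pre_, which supplies fuel `hierarchy.length + 1` at top level).
-- `if not descendants: descendants = set()` is value-transparent (empty set → empty set),
-- and `descendants.update(result)` where `result` aliases/extends `descendants` is exactly
-- `PySem.Set.update` of the accumulator with the recursive call's value.
def pvGoA (hierarchy : List (String × List String)) : Nat → String → List String → List String
  | 0, _, descendants => descendants
  | fuel+1, term_id, descendants =>
    if pvChildren hierarchy term_id = [] then
      PySem.Set.add descendants term_id
    else
      -- for c in children: descendants.update(get_bottom_descendants(hierarchy, c, descendants))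
      (pvChildren hierarchy term_id).foldl (fun descendants c =>
        PySem.Set.update descendants (pvGoA hierarchy fuel c descendants)) descendants

def get_bottom_descendants (hierarchy : List (String × List String)) (term_id : String) (descendants : Option (List String)) : List String :=
  pvGoA hierarchy (hierarchy.length + 1) term_id
    (match descendants with
     | none => []        -- descendants = set()
     | some ds => ds)

-- ===== PORT B =====
-- Iterative DFS; the Python list used as a stack (pop from the end, children pushed reversed)
-- is modelled with the top of the stack at the HEAD of the Lean list, so the push becomes
-- `children ++ rest`.  The fuel only makes the loop total: `1 + Σ (|children|+1)` bounds the
-- number of iterations on EVERY input (each term is expanded at most once).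
def pvGoB (hierarchy : List (String × List String)) : Nat → List String → List String → List String → List String
  | 0, _, _, result => result
  | fuel+1, stack, visited, result =>
    match stack with
    | [] => result
    | t :: rest =>
      if PySem.Set.contains visited t then pvGoB hierarchy fuel rest visited result
      else if pvChildren hierarchy t = [] then
        pvGoB hierarchy fuel rest (PySem.Set.add visited t) (PySem.Set.add result t)
      else
        pvGoB hierarchy fuel (pvChildren hierarchy t ++ rest) (PySem.Set.add visited t) result

def get_bottom_descendants_alt (hierarchy : List (String × List String)) (term_id : String) (descendants : Option (List String)) : List String :=
  pvGoB hierarchy (1 + hierarchy.foldl (fun a p => a + (p.2.length + 1)) 0) [term_id] []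
    (match descendants with
     | none => []                       -- set()
     | some ds => PySem.Set.ofList ds)  -- set(descendants)  ([] is falsy: ofList [] = [])

-- ===== PRECONDITION & SPEC =====
-- nodes reachable from t by following `pvChildren` edges for at most `fuel` steps
-- (every reachable node is reached within `hierarchy.length` steps, so the bound saturates)
def pvReach (hierarchy : List (String × List String)) : Nat → String → List String
  | 0, t => [t]
  | fuel+1, t => (pvChildren hierarchy t).foldl
      (fun s c => PySem.Set.update s (pvReach hierarchy fuel c)) [t]

-- pvReach computes the REACHABLE SET of the child graph (everything within `fuel` edges of
-- t); it is a property of the input graph itself — which node can reach which — not a trace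
-- of either port: acyclicity of a finite graph has no quantifier-free statement, and every
-- reachable node is within hierarchy.length edges, so this bounded closure is exact.
-- Pre_ excludes exactly (i) inputs whose `descendants` list is not a valid encoding of a
-- Python set (it has duplicates; the set type convention requires distinct elements) and
-- (ii) hierarchies with a cycle reachable from term_id, on which A raises RecursionError.
def Pre_get_bottom_descendants (hierarchy : List (String × List String)) (term_id : String) (descendants : Option (List String)) : Prop :=
  (descendants.getD []).Nodup ∧
  ∀ u ∈ pvReach hierarchy hierarchy.length term_id,
    ∀ c ∈ pvChildren hierarchy u, u ∉ pvReach hierarchy hierarchy.length c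

instance (hierarchy : List (String × List String)) (term_id : String) (descendants : Option (List String)) : Decidable (Pre_get_bottom_descendants hierarchy term_id descendants) := by unfold Pre_get_bottom_descendants; infer_instance

def pvWitness_get_bottom_descendants : (List (String × List String)) × String × Option (List String) :=
  ([("a", ["b", "c"]), ("b", ["d"])], "a", some ["x"])

-- On hierarchies with a cycle reachable from term_id, A raises RecursionError while B's
-- visited set makes it terminate and return the bottom-level descendants it found.
def Raises_get_bottom_descendants (hierarchy : List (String × List String)) (term_id : String) (descendants : Option (List String)) : Prop :=
  ¬ (∀ u ∈ pvReach hierarchy hierarchy.length term_id,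
      ∀ c ∈ pvChildren hierarchy u, u ∉ pvReach hierarchy hierarchy.length c)

instance (hierarchy : List (String × List String)) (term_id : String) (descendants : Option (List String)) : Decidable (Raises_get_bottom_descendants hierarchy term_id descendants) := by unfold Raises_get_bottom_descendants; infer_instance

def pvRaiseWitness_get_bottom_descendants : (List (String × List String)) × String × Option (List String) :=
  ([("a", ["a"])], "a", none)

def pvRaiseWitnessOut_get_bottom_descendants : List String := []

def Spec_get_bottom_descendants (hierarchy : List (String × List String)) (term_id : String) (descendants : Option (List String)) (out : List String) : Prop := out = get_bottom_descendants_alt hierarchy term_id descendants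
instance (hierarchy : List (String × List String)) (term_id : String) (descendants : Option (List String)) (out : List String) : Decidable (Spec_get_bottom_descendants hierarchy term_id descendants out) := by unfold Spec_get_bottom_descendants; infer_instance

-- ===== CLAIM (what is proved, stated in full; the proofs are below) =====
def Claim_equal_get_bottom_descendants : Prop := ∀ (hierarchy : List (String × List String)) (term_id : String) (descendants : Option (List String)), Dom_get_bottom_descendants hierarchy term_id descendants → Pre_get_bottom_descendants hierarchy term_id descendants → Spec_get_bottom_descendants hierarchy term_id descendants (get_bottom_descendants hierarchy term_id descendants)

-- Claim_raises_get_bottom_descendants is proved at the bottom of the file as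
-- theorem get_bottom_descendants_raises (A raises on every input of Raises_, B returns []
-- at the witness ⟨[("a",["a"])], "a", none⟩).
def Claim_raises_get_bottom_descendants : Prop := (∀ (hierarchy : List (String × List String)) (term_id : String) (descendants : Option (List String)), Dom_get_bottom_descendants hierarchy term_id descendants → Raises_get_bottom_descendants hierarchy term_id descendants → ¬ Pre_get_bottom_descendants hierarchy term_id descendants) ∧ (Dom_get_bottom_descendants (pvRaiseWitness_get_bottom_descendants.1) (pvRaiseWitness_get_bottom_descendants.2.1) (pvRaiseWitness_get_bottom_descendants.2.2) ∧ Raises_get_bottom_descendants (pvRaiseWitness_get_bottom_descendants.1) (pvRaiseWitness_get_bottom_descendants.2.1) (pvRaiseWitness_get_bottom_descendants.2.2) ∧ get_bottom_descendants_alt (pvRaiseWitness_get_bottom_descendants.1) (pvRaiseWitness_get_bottom_descendants.2.1) (pvRaiseWitness_get_bottom_descendants.2.2) = pvRaiseWitnessOut_get_bottom_descendants)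

-- ===== LEMMAS AND PROOFS =====

-- ---- unfolding equations used with rw (simp [pvGoA] would also unfold inner calls) ----
lemma pvGoA_succ (hierarchy : List (String × List String)) (f : Nat) (t : String) (d : List String) :
    pvGoA hierarchy (f+1) t d =
      if pvChildren hierarchy t = [] then PySem.Set.add d t
      else (pvChildren hierarchy t).foldl (fun d c => PySem.Set.update d (pvGoA hierarchy f c d)) d := rfl

-- ---- generic PySem.Set facts about update ----
lemma pvUpdate_of_subset (s l : List String) (h : ∀ x ∈ l, x ∈ s) : PySem.Set.update s l = s := by
  induction l generalizing s with
  | nil => rfl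
  | cons x l ih =>
    rw [PySem.Set.update_cons, PySem.Set.add_of_mem (h x (by simp))]
    exact ih s (fun y hy => h y (by simp [hy]))

lemma pvUpdate_self (s : List String) : PySem.Set.update s s = s :=
  pvUpdate_of_subset s s (fun _ hx => hx)

lemma pvUpdate_update (R S X : List String) :
    PySem.Set.update R (PySem.Set.update S X) = PySem.Set.update (PySem.Set.update R S) X := by
  induction X generalizing S with
  | nil => rfl
  | cons x X ih =>
    have key : ∀ (S' : List String), PySem.Set.update R (PySem.Set.add S' x) = PySem.Set.add (PySem.Set.update R S') x := by
      intro S'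
      by_cases hx : x ∈ S'
      · rw [PySem.Set.add_of_mem hx, PySem.Set.add_of_mem ((PySem.Set.mem_update R S' x).mpr (Or.inr hx))]
      · rw [PySem.Set.add_of_not_mem hx, PySem.Set.update_append]
        rfl
    rw [PySem.Set.update_cons, PySem.Set.update_cons, ih, key]

lemma pvUpdate_idem (R X : List String) :
    PySem.Set.update R (PySem.Set.update R X) = PySem.Set.update R X := by
  rw [pvUpdate_update, pvUpdate_self]

lemma pvUpdate_nil_nodup (X : List String) (h : X.Nodup) : PySem.Set.update [] X = X := by
  have h0 : PySem.Set.update [] X = PySem.Set.ofList X := rfl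
  rw [h0, PySem.Set.ofList_eq_self_of_nodup X h]

-- foldl of update-with-g, membership characterisation
lemma pvMem_foldl_update (g : String → List String) (cs : List String) (init : List String) (x : String) :
    x ∈ cs.foldl (fun s c => PySem.Set.update s (g c)) init ↔ x ∈ init ∨ ∃ c ∈ cs, x ∈ g c := by
  induction cs generalizing init with
  | nil => simp
  | cons c cs ih =>
    simp only [List.foldl_cons, ih, PySem.Set.mem_update]
    constructor
    · rintro ((h | h) | ⟨d, hd, hx⟩)
      · exact Or.inl h
      · exact Or.inr ⟨c, by simp, h⟩
      · exact Or.inr ⟨d, by simp [hd], hx⟩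
    · rintro (h | ⟨d, hd, hx⟩)
      · exact Or.inl (Or.inl h)
      · rcases List.mem_cons.mp hd with h | h
        · subst h; exact Or.inl (Or.inr hx)
        · exact Or.inr ⟨d, h, hx⟩

-- hoisting the start value out of an update-fold
lemma pvFoldl_update_hoist (g : String → List String) (cs : List String) (R : List String)
    (hnd : ∀ c ∈ cs, (g c).Nodup) :
    cs.foldl (fun s c => PySem.Set.update s (g c)) R
      = PySem.Set.update R (cs.foldl (fun s c => PySem.Set.update s (g c)) []) := by
  induction cs generalizing R with
  | nil => rfl
  | cons c cs ih =>
    simp only [List.foldl_cons]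
    rw [ih (PySem.Set.update R (g c)) (fun d hd => hnd d (by simp [hd])),
        pvUpdate_nil_nodup (g c) (hnd c (by simp)),
        ih (g c) (fun d hd => hnd d (by simp [hd])),
        pvUpdate_update]

-- ---- fuel-bounded depth predicate for A's recursion ----
def pvSuff (hierarchy : List (String × List String)) : Nat → String → Prop
  | 0, _ => False
  | fuel+1, t => pvChildren hierarchy t = [] ∨ ∀ c ∈ pvChildren hierarchy t, pvSuff hierarchy fuel c

lemma pvSuff_mono (hierarchy : List (String × List String)) (f : Nat) (t : String)
    (h : pvSuff hierarchy f t) : pvSuff hierarchy (f+1) t := by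
  induction f generalizing t with
  | zero => exact h.elim
  | succ f ih =>
    rcases h with h | h
    · exact Or.inl h
    · exact Or.inr (fun c hc => ih c (h c hc))

lemma pvSuff_le (hierarchy : List (String × List String)) (f g : Nat) (t : String)
    (h : pvSuff hierarchy f t) (hfg : f ≤ g) : pvSuff hierarchy g t := by
  induction g, hfg using Nat.le_induction with
  | base => exact h
  | succ g hg ih => exact pvSuff_mono hierarchy g t ih

lemma pvGoA_nodup (hierarchy : List (String × List String)) (f : Nat) (t : String) (d : List String)
    (hd : d.Nodup) : (pvGoA hierarchy f t d).Nodup := by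
  induction f generalizing t d with
  | zero => exact hd
  | succ f ih =>
    rw [pvGoA_succ]
    by_cases hc : pvChildren hierarchy t = []
    · rw [if_pos hc]; exact PySem.Set.nodup_add d t hd
    · rw [if_neg hc]
      have gen : ∀ (cs : List String) (d : List String), d.Nodup →
          (cs.foldl (fun d c => PySem.Set.update d (pvGoA hierarchy f c d)) d).Nodup := by
        intro cs
        induction cs with
        | nil => exact fun d hd => hd
        | cons c cs ih2 =>
          intro d hd
          exact ih2 _ (PySem.Set.nodup_update _ _ hd)
      exact gen _ d hd

lemma pvGoA_irrel1 (hierarchy : List (String × List String)) (f : Nat) (t : String)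
    (h : pvSuff hierarchy f t) : ∀ d, pvGoA hierarchy f t d = pvGoA hierarchy (f+1) t d := by
  induction f generalizing t with
  | zero => exact h.elim
  | succ f ih =>
    intro d
    rw [pvGoA_succ, pvGoA_succ]
    by_cases hc : pvChildren hierarchy t = []
    · rw [if_pos hc, if_pos hc]
    · rw [if_neg hc, if_neg hc]
      rcases h with h | h
      · exact absurd h hc
      · exact PySem.List.foldl_congr_mem _ _ _ d
          (fun acc c hcmem => by rw [ih c (h c hcmem) acc])

lemma pvGoA_irrel (hierarchy : List (String × List String)) (f g : Nat) (t : String)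
    (h : pvSuff hierarchy f t) (hfg : f ≤ g) (d : List String) :
    pvGoA hierarchy f t d = pvGoA hierarchy g t d := by
  induction g, hfg using Nat.le_induction with
  | base => rfl
  | succ g hg ih =>
    rw [ih, pvGoA_irrel1 hierarchy g t (pvSuff_le hierarchy f g t h hg) d]

-- A's recursion in "update form": processing t appends t's new leaves to the accumulator
lemma pvGoA_update_form (hierarchy : List (String × List String)) (f : Nat) (t : String)
    (h : pvSuff hierarchy f t) :
    ∀ d, pvGoA hierarchy f t d = PySem.Set.update d (pvGoA hierarchy f t []) := by
  induction f generalizing t with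
  | zero => exact h.elim
  | succ f ih =>
    intro d
    rw [pvGoA_succ, pvGoA_succ]
    by_cases hc : pvChildren hierarchy t = []
    · rw [if_pos hc, if_pos hc]; rfl
    · rw [if_neg hc, if_neg hc]
      rcases h with h | h
      · exact absurd h hc
      · have conv1 : ∀ (d : List String),
            (pvChildren hierarchy t).foldl (fun d c => PySem.Set.update d (pvGoA hierarchy f c d)) d
            = (pvChildren hierarchy t).foldl (fun d c => PySem.Set.update d (pvGoA hierarchy f c [])) d := by
          intro d
          exact PySem.List.foldl_congr_mem _ _ _ d (fun acc c hcmem => by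
            rw [ih c (h c hcmem) acc, pvUpdate_idem])
        rw [conv1, conv1]
        exact pvFoldl_update_hoist _ _ d
          (fun c hcmem => pvGoA_nodup hierarchy f c [] List.nodup_nil)

-- ---- reachability ----
inductive pvReaches (hierarchy : List (String × List String)) : String → String → Prop
  | refl (t : String) : pvReaches hierarchy t t
  | step {t c u : String} : c ∈ pvChildren hierarchy t → pvReaches hierarchy c u → pvReaches hierarchy t u

lemma pvReaches_trans (hierarchy : List (String × List String)) {t u v : String}
    (h1 : pvReaches hierarchy t u) (h2 : pvReaches hierarchy u v) : pvReaches hierarchy t v := by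
  induction h1 with
  | refl => exact h2
  | step hc _ ih => exact pvReaches.step hc (ih h2)

lemma pvReach_succ (hierarchy : List (String × List String)) (f : Nat) (t : String) :
    pvReach hierarchy (f+1) t = (pvChildren hierarchy t).foldl
      (fun s c => PySem.Set.update s (pvReach hierarchy f c)) [t] := rfl

lemma pvMem_reach_succ (hierarchy : List (String × List String)) (f : Nat) (t x : String) :
    x ∈ pvReach hierarchy (f+1) t ↔ x = t ∨ ∃ c ∈ pvChildren hierarchy t, x ∈ pvReach hierarchy f c := by
  rw [pvReach_succ, pvMem_foldl_update]
  simp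

lemma pvSelf_mem_reach (hierarchy : List (String × List String)) (f : Nat) (t : String) :
    t ∈ pvReach hierarchy f t := by
  cases f with
  | zero => simp [pvReach]
  | succ f => exact (pvMem_reach_succ hierarchy f t t).mpr (Or.inl rfl)

lemma pvReach_sound (hierarchy : List (String × List String)) (f : Nat) (t x : String)
    (h : x ∈ pvReach hierarchy f t) : pvReaches hierarchy t x := by
  induction f generalizing t with
  | zero => simp [pvReach] at h; subst h; exact pvReaches.refl _
  | succ f ih =>
    rcases (pvMem_reach_succ hierarchy f t x).mp h with h | ⟨c, hc, hx⟩
    · subst h; exact pvReaches.refl _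
    · exact pvReaches.step hc (ih c hx)

-- ---- paths, and completeness of the bounded reach list ----
def pvIsPath (hierarchy : List (String × List String)) : String → List String → String → Prop
  | t, [], u => t = u
  | t, c :: p, u => c ∈ pvChildren hierarchy t ∧ pvIsPath hierarchy c p u

lemma pvIsPath_nil (hierarchy : List (String × List String)) (t u : String) :
    pvIsPath hierarchy t [] u ↔ t = u := Iff.rfl

lemma pvIsPath_cons (hierarchy : List (String × List String)) (t c u : String) (p : List String) :
    pvIsPath hierarchy t (c :: p) u ↔ c ∈ pvChildren hierarchy t ∧ pvIsPath hierarchy c p u := Iff.rfl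

lemma pvReaches_iff_path (hierarchy : List (String × List String)) (t u : String) :
    pvReaches hierarchy t u ↔ ∃ p, pvIsPath hierarchy t p u := by
  constructor
  · intro h
    induction h with
    | refl t => exact ⟨[], rfl⟩
    | step hc _ ih =>
      obtain ⟨p, hp⟩ := ih
      exact ⟨_ :: p, hc, hp⟩
  · rintro ⟨p, hp⟩
    induction p generalizing t with
    | nil => rw [pvIsPath_nil] at hp; subst hp; exact pvReaches.refl _
    | cons c p ih => exact pvReaches.step hp.1 (ih c hp.2)

lemma pvPath_to_reach (hierarchy : List (String × List String)) (p : List String) (t u : String) (f : Nat)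
    (hp : pvIsPath hierarchy t p u) (hf : p.length ≤ f) : u ∈ pvReach hierarchy f t := by
  induction p generalizing t f with
  | nil => rw [pvIsPath_nil] at hp; subst hp; exact pvSelf_mem_reach hierarchy f t
  | cons c p ih =>
    cases f with
    | zero => simp at hf
    | succ f =>
      exact (pvMem_reach_succ hierarchy f t u).mpr
        (Or.inr ⟨c, hp.1, ih c f hp.2 (by simpa using hf)⟩)

lemma pvPath_split (hierarchy : List (String × List String)) (p q : List String) (t u : String)
    (h : pvIsPath hierarchy t (p ++ q) u) : ∃ m, pvIsPath hierarchy t p m ∧ pvIsPath hierarchy m q u := by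
  induction p generalizing t with
  | nil => exact ⟨t, rfl, h⟩
  | cons c p ih =>
    obtain ⟨m, h1, h2⟩ := ih c h.2
    exact ⟨m, ⟨h.1, h1⟩, h2⟩

lemma pvPath_combine (hierarchy : List (String × List String)) (p q : List String) (t m u : String)
    (h1 : pvIsPath hierarchy t p m) (h2 : pvIsPath hierarchy m q u) : pvIsPath hierarchy t (p ++ q) u := by
  induction p generalizing t with
  | nil => rw [pvIsPath_nil] at h1; subst h1; exact h2
  | cons c p ih => exact ⟨h1.1, ih c h1.2⟩

lemma pvPath_last (hierarchy : List (String × List String)) (p : List String) (t a m : String)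
    (h : pvIsPath hierarchy t (p ++ [a]) m) : m = a := by
  obtain ⟨m', _, h2⟩ := pvPath_split hierarchy p [a] t m h
  rw [pvIsPath_cons] at h2
  rw [pvIsPath_nil] at h2
  exact h2.2.symm

-- a list that is not Nodup contains a repeated element, with an explicit split
lemma pvExists_dup_split (l : List String) (h : ¬ l.Nodup) :
    ∃ (l1 l2 l3 : List String) (a : String), l = l1 ++ a :: (l2 ++ a :: l3) := by
  induction l with
  | nil => simp at h
  | cons x l ih =>
    by_cases hx : x ∈ l
    · obtain ⟨l2, l3, rfl⟩ := List.append_of_mem hx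
      exact ⟨[], l2, l3, x, rfl⟩
    · have hnd : ¬ l.Nodup := fun hnd => h (List.nodup_cons.mpr ⟨hx, hnd⟩)
      obtain ⟨l1, l2, l3, a, rfl⟩ := ih hnd
      exact ⟨x :: l1, l2, l3, a, rfl⟩

lemma pvPath_shorten (hierarchy : List (String × List String)) :
    ∀ (n : Nat) (p : List String) (t u : String), p.length ≤ n → pvIsPath hierarchy t p u →
      ∃ q, pvIsPath hierarchy t q u ∧ (t :: q).Nodup := by
  intro n
  induction n with
  | zero =>
    intro p t u hn hp
    have hnil : p = [] := List.eq_nil_of_length_eq_zero (by omega)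
    subst hnil
    exact ⟨[], hp, by simp⟩
  | succ n ih =>
    intro p t u hn hp
    by_cases hnd : (t :: p).Nodup
    · exact ⟨p, hp, hnd⟩
    · obtain ⟨l1, l2, l3, a, hsplit⟩ := pvExists_dup_split (t :: p) hnd
      cases l1 with
      | nil =>
        -- t = a : the path revisits its start, cut the prefix loop
        rw [List.nil_append] at hsplit
        injection hsplit with ht hpp
        rw [hpp] at hp hn
        rw [ht] at hp ⊢
        have hp2 : pvIsPath hierarchy a ((l2 ++ [a]) ++ l3) u := by simpa using hp
        obtain ⟨m, h1, h2⟩ := pvPath_split hierarchy (l2 ++ [a]) l3 a u hp2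
        have hm := pvPath_last hierarchy l2 a a m h1
        rw [hm] at h2
        refine ih l3 a u ?_ h2
        simp at hn ⊢
        omega
      | cons x l1 =>
        rw [List.cons_append] at hsplit
        injection hsplit with ht hpp
        rw [hpp] at hp hn
        rw [ht] at hp ⊢
        have hp2 : pvIsPath hierarchy x ((l1 ++ [a]) ++ (l2 ++ a :: l3)) u := by simpa using hp
        obtain ⟨m, h1, h2⟩ := pvPath_split hierarchy (l1 ++ [a]) (l2 ++ a :: l3) x u hp2
        have hm := pvPath_last hierarchy l1 x a m h1
        rw [hm] at h1 h2
        have hp3 : pvIsPath hierarchy a ((l2 ++ [a]) ++ l3) u := by simpa using h2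
        obtain ⟨m2, h3, h4⟩ := pvPath_split hierarchy (l2 ++ [a]) l3 a u hp3
        have hm2 := pvPath_last hierarchy l2 a a m2 h3
        rw [hm2] at h4
        have hcomb := pvPath_combine hierarchy (l1 ++ [a]) l3 x a u h1 h4
        refine ih ((l1 ++ [a]) ++ l3) x u ?_ hcomb
        simp at hn ⊢
        omega

lemma pvChildren_ne_nil_mem_keys (hierarchy : List (String × List String)) (x : String)
    (h : pvChildren hierarchy x ≠ []) : x ∈ hierarchy.map Prod.fst := by
  unfold pvChildren at h
  induction hierarchy with
  | nil => simp [PySem.Dict.get?] at h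
  | cons p l ih =>
    by_cases hx : p.1 = x
    · simp [hx]
    · have h2 : ((PySem.Dict.mk l).get? x).getD [] ≠ [] := by
        simpa [PySem.Dict.get?, hx] using h
      simpa using Or.inr (ih h2)

lemma pvPath_sources_keys (hierarchy : List (String × List String)) (p : List String) (t u : String)
    (hp : pvIsPath hierarchy t p u) : ∀ x ∈ (t :: p).dropLast, x ∈ hierarchy.map Prod.fst := by
  induction p generalizing t with
  | nil => simp
  | cons c p ih =>
    intro x hx
    have hdl : (t :: c :: p).dropLast = t :: (c :: p).dropLast := by simp
    rw [hdl] at hx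
    rcases List.mem_cons.mp hx with rfl | hx
    · refine pvChildren_ne_nil_mem_keys hierarchy x (fun he => ?_)
      rw [pvIsPath_cons, he] at hp
      simp at hp
    · exact ih c hp.2 x hx

lemma pvNodup_length_le (l L : List String) (hnd : l.Nodup) (hsub : ∀ x ∈ l, x ∈ L) :
    l.length ≤ L.length := by
  classical
  have h1 : l.toFinset.card = l.length := List.toFinset_card_of_nodup hnd
  have h2 : l.toFinset ⊆ L.toFinset := by
    intro x hx
    simp only [List.mem_toFinset] at hx ⊢
    exact hsub x hx
  have h3 : L.toFinset.card ≤ L.length := L.toFinset_card_le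
  have h4 := Finset.card_le_card h2
  omega

lemma pvReach_complete (hierarchy : List (String × List String)) (t u : String)
    (h : pvReaches hierarchy t u) : u ∈ pvReach hierarchy hierarchy.length t := by
  obtain ⟨p, hp⟩ := (pvReaches_iff_path hierarchy t u).mp h
  obtain ⟨q, hq, hnd⟩ := pvPath_shorten hierarchy p.length p t u le_rfl hp
  apply pvPath_to_reach hierarchy q t u hierarchy.length hq
  have hkeys := pvPath_sources_keys hierarchy q t u hq
  have hnd' : ((t :: q).dropLast).Nodup := hnd.sublist (List.dropLast_sublist _)
  have hlen := pvNodup_length_le ((t :: q).dropLast) (hierarchy.map Prod.fst) hnd' hkeys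
  simp only [List.length_dropLast, List.length_cons, List.length_map] at hlen
  omega

-- ---- Pre_ gives: acyclicity below term_id, and sufficient fuel ----
lemma pvAcyc_below (hierarchy : List (String × List String)) (term_id : String)
    (hPre : ∀ u ∈ pvReach hierarchy hierarchy.length term_id,
      ∀ c ∈ pvChildren hierarchy u, u ∉ pvReach hierarchy hierarchy.length c)
    (u : String) (hu : pvReaches hierarchy term_id u) :
    ∀ c ∈ pvChildren hierarchy u, ¬ pvReaches hierarchy c u := by
  intro c hc hcu
  exact hPre u (pvReach_complete hierarchy term_id u hu) c hc (pvReach_complete hierarchy c u hcu)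

-- measure: number of keys reachable from t
def pvMeasure (hierarchy : List (String × List String)) (t : String) : Nat :=
  ((pvReach hierarchy hierarchy.length t).toFinset ∩ (hierarchy.map Prod.fst).toFinset).card

lemma pvSuff_of_measure (hierarchy : List (String × List String)) (term_id : String)
    (hPre : ∀ u ∈ pvReach hierarchy hierarchy.length term_id,
      ∀ c ∈ pvChildren hierarchy u, u ∉ pvReach hierarchy hierarchy.length c) :
    ∀ (f : Nat) (t : String), pvReaches hierarchy term_id t → pvMeasure hierarchy t < f →
      pvSuff hierarchy f t := by
  classical
  intro f
  induction f with
  | zero => intro t _ h; omega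
  | succ f ih =>
    intro t ht hm
    by_cases hc : pvChildren hierarchy t = []
    · exact Or.inl hc
    · refine Or.inr (fun c hcmem => ?_)
      have htc : pvReaches hierarchy term_id c :=
        pvReaches_trans hierarchy ht (pvReaches.step hcmem (pvReaches.refl c))
      apply ih c htc
      have hsub : (pvReach hierarchy hierarchy.length c).toFinset ∩ (hierarchy.map Prod.fst).toFinset
          ⊆ (pvReach hierarchy hierarchy.length t).toFinset ∩ (hierarchy.map Prod.fst).toFinset := by
        intro x hx
        simp only [Finset.mem_inter, List.mem_toFinset] at hx ⊢
        refine ⟨?_, hx.2⟩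
        have hr : pvReaches hierarchy t x :=
          pvReaches.step hcmem (pvReach_sound hierarchy hierarchy.length c x hx.1)
        exact pvReach_complete hierarchy t x hr
      have hne : t ∈ (pvReach hierarchy hierarchy.length t).toFinset ∩ (hierarchy.map Prod.fst).toFinset := by
        simp only [Finset.mem_inter, List.mem_toFinset]
        exact ⟨pvSelf_mem_reach hierarchy hierarchy.length t, pvChildren_ne_nil_mem_keys hierarchy t hc⟩
      have hnotin : t ∉ (pvReach hierarchy hierarchy.length c).toFinset ∩ (hierarchy.map Prod.fst).toFinset := by
        simp only [Finset.mem_inter, List.mem_toFinset]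
        rintro ⟨hin, -⟩
        exact hPre t (pvReach_complete hierarchy term_id t ht) c hcmem hin
      have hlt : pvMeasure hierarchy c < pvMeasure hierarchy t :=
        Finset.card_lt_card ((Finset.ssubset_iff_of_subset hsub).mpr ⟨t, hne, hnotin⟩)
      omega

lemma pvSuff_term (hierarchy : List (String × List String)) (term_id : String)
    (hPre : ∀ u ∈ pvReach hierarchy hierarchy.length term_id,
      ∀ c ∈ pvChildren hierarchy u, u ∉ pvReach hierarchy hierarchy.length c) :
    pvSuff hierarchy (hierarchy.length + 1) term_id := by
  classical
  apply pvSuff_of_measure hierarchy term_id hPre (hierarchy.length + 1) term_id (pvReaches.refl term_id)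
  have h1 : pvMeasure hierarchy term_id ≤ (hierarchy.map Prod.fst).toFinset.card :=
    Finset.card_le_card Finset.inter_subset_right
  have h2 : (hierarchy.map Prod.fst).toFinset.card ≤ hierarchy.length := by
    have h3 := (hierarchy.map Prod.fst).toFinset_card_le
    simpa using h3
  omega

-- ---- the potential function bounding B's iteration count ----
def pvPhi (hierarchy : List (String × List String)) (V : List String) : Nat :=
  match hierarchy with
  | [] => 0
  | p :: l => (if p.1 ∈ V then 0 else p.2.length + 1) + pvPhi l V

lemma pvPhi_mono (hierarchy : List (String × List String)) (V V' : List String)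
    (h : ∀ x ∈ V, x ∈ V') : pvPhi hierarchy V' ≤ pvPhi hierarchy V := by
  induction hierarchy with
  | nil => simp [pvPhi]
  | cons p l ih =>
    simp only [pvPhi]
    by_cases h2 : p.1 ∈ V
    · have h1 : p.1 ∈ V' := h p.1 h2
      rw [if_pos h1, if_pos h2]; omega
    · by_cases h1 : p.1 ∈ V'
      · rw [if_pos h1, if_neg h2]; omega
      · rw [if_neg h1, if_neg h2]; omega

lemma pvPhi_drop (hierarchy : List (String × List String)) (V : List String) (t : String)
    (htV : t ∉ V) (hkey : t ∈ hierarchy.map Prod.fst) :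
    pvPhi hierarchy (PySem.Set.add V t) + (pvChildren hierarchy t).length + 1 ≤ pvPhi hierarchy V := by
  induction hierarchy with
  | nil => simp at hkey
  | cons p l ih =>
    by_cases hx : p.1 = t
    · have hchild : pvChildren (p :: l) t = p.2 := by
        simp [pvChildren, PySem.Dict.get?, hx]
      have hin : p.1 ∈ PySem.Set.add V t := (PySem.Set.mem_add V t p.1).mpr (Or.inr hx)
      have hout : p.1 ∉ V := hx ▸ htV
      have hmono : pvPhi l (PySem.Set.add V t) ≤ pvPhi l V :=
        pvPhi_mono l V (PySem.Set.add V t) (fun x hxm => (PySem.Set.mem_add V t x).mpr (Or.inl hxm))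
      simp only [pvPhi, if_pos hin, if_neg hout, hchild]
      omega
    · have hchild : pvChildren (p :: l) t = pvChildren l t := by
        simp [pvChildren, PySem.Dict.get?, hx]
      have hkey2 : t ∈ l.map Prod.fst := by
        rcases List.mem_map.mp hkey with ⟨q, hq, hq2⟩
        rcases List.mem_cons.mp hq with rfl | hq
        · exact absurd hq2 hx
        · exact List.mem_map.mpr ⟨q, hq, hq2⟩
      have hiff : p.1 ∈ PySem.Set.add V t ↔ p.1 ∈ V := by
        rw [PySem.Set.mem_add]
        constructor
        · rintro (hm | hm)
          · exact hm
          · exact absurd hm hx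
        · exact Or.inl
      have hIH := ih hkey2
      rw [hchild] at *
      simp only [pvPhi]
      by_cases hm : p.1 ∈ V
      · rw [if_pos (hiff.mpr hm), if_pos hm]; omega
      · rw [if_neg (fun hmm => hm (hiff.mp hmm)), if_neg hm]; omega

-- ---- the simulation invariant: every visited term already has its leaves in result,
--      except the grey terms (ancestors currently being expanded) ----
def pvInv (hierarchy : List (String × List String)) (G V R : List String) : Prop :=
  ∀ v ∈ V, v ∈ G ∨ ∃ fv, pvSuff hierarchy fv v ∧ ∀ x ∈ pvGoA hierarchy fv v [], x ∈ R

lemma pvGoB_nil (hierarchy : List (String × List String)) (f : Nat) (V R : List String) :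
    pvGoB hierarchy f [] V R = R := by
  cases f <;> rfl

lemma pvGoB_succ (hierarchy : List (String × List String)) (f : Nat) (t : String)
    (rest V R : List String) :
    pvGoB hierarchy (f+1) (t :: rest) V R =
      if PySem.Set.contains V t then pvGoB hierarchy f rest V R
      else if pvChildren hierarchy t = [] then
        pvGoB hierarchy f rest (PySem.Set.add V t) (PySem.Set.add R t)
      else
        pvGoB hierarchy f (pvChildren hierarchy t ++ rest) (PySem.Set.add V t) R := rfl

-- the main simulation lemma: running B's loop on `t :: rest` first processes t's whole
-- (memoised) subtree, appending exactly t's leaf set to the result, and charges at most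
-- 1 + (drop in potential) iterations
theorem pvSim (hierarchy : List (String × List String)) :
    ∀ (fA : Nat) (t : String) (G V R rest : List String),
    pvSuff hierarchy fA t →
    (∀ u, pvReaches hierarchy t u → ∀ c ∈ pvChildren hierarchy u, ¬ pvReaches hierarchy c u) →
    (∀ g ∈ G, ¬ pvReaches hierarchy t g) →
    pvInv hierarchy G V R →
    ∃ (c : Nat) (V' : List String), 1 ≤ c ∧ c + pvPhi hierarchy V' ≤ 1 + pvPhi hierarchy V ∧
      (∀ v ∈ V, v ∈ V') ∧
      pvInv hierarchy G V' (PySem.Set.update R (pvGoA hierarchy fA t [])) ∧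
      (∀ f, pvGoB hierarchy (f + c) (t :: rest) V R
          = pvGoB hierarchy f rest V' (PySem.Set.update R (pvGoA hierarchy fA t []))) := by
  intro fA
  induction fA with
  | zero => intro t G V R rest hS; exact hS.elim
  | succ f ihf =>
    -- sibling fold: process a list of terms, each with depth bound f
    have fold : ∀ (cs : List String) (G V R rest : List String),
        (∀ c ∈ cs, pvSuff hierarchy f c) →
        (∀ c ∈ cs, ∀ u, pvReaches hierarchy c u → ∀ d ∈ pvChildren hierarchy u, ¬ pvReaches hierarchy d u) →
        (∀ c ∈ cs, ∀ g ∈ G, ¬ pvReaches hierarchy c g) →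
        pvInv hierarchy G V R →
        ∃ (cc : Nat) (V' : List String),
          cc + pvPhi hierarchy V' ≤ cs.length + pvPhi hierarchy V ∧
          (∀ v ∈ V, v ∈ V') ∧
          pvInv hierarchy G V' (cs.foldl (fun r c => PySem.Set.update r (pvGoA hierarchy f c [])) R) ∧
          (∀ fb, pvGoB hierarchy (fb + cc) (cs ++ rest) V R
              = pvGoB hierarchy fb rest V'
                  (cs.foldl (fun r c => PySem.Set.update r (pvGoA hierarchy f c [])) R)) := by
      intro cs
      induction cs with
      | nil =>
        intro G V R rest _ _ _ hInv
        exact ⟨0, V, by omega, fun v hv => hv, hInv, fun fb => rfl⟩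
      | cons c cs ihc =>
        intro G V R rest hSf hAcs hGs hInv
        obtain ⟨c1, V1, hc1, hphi1, hsub1, hInv1, hrun1⟩ :=
          ihf c G V R (cs ++ rest) (hSf c (by simp)) (hAcs c (by simp)) (hGs c (by simp)) hInv
        obtain ⟨cc, V2, hphi2, hsub2, hInv2, hrun2⟩ :=
          ihc G V1 (PySem.Set.update R (pvGoA hierarchy f c [])) rest
            (fun d hd => hSf d (by simp [hd]))
            (fun d hd => hAcs d (by simp [hd]))
            (fun d hd => hGs d (by simp [hd])) hInv1
        refine ⟨c1 + cc, V2, by simp only [List.length_cons]; omega,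
          fun v hv => hsub2 v (hsub1 v hv), ?_, ?_⟩
        · simpa only [List.foldl_cons] using hInv2
        · intro fb
          have e0 : fb + (c1 + cc) = (fb + cc) + c1 := by omega
          rw [e0]
          have e1 : ((c :: cs) ++ rest) = c :: (cs ++ rest) := rfl
          rw [e1, hrun1 (fb + cc), hrun2 fb]
          simp only [List.foldl_cons]
    intro t G V R rest hS hAc hG hInv
    by_cases hv : t ∈ V
    · -- t already visited: skip, its leaves are already in R
      rcases hInv t hv with hg | ⟨fv, hfv, hsubR⟩
      · exact absurd (pvReaches.refl t) (hG t hg)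
      · have hirr : pvGoA hierarchy (f+1) t [] = pvGoA hierarchy fv t [] := by
          rw [pvGoA_irrel hierarchy fv (max fv (f+1)) t hfv (le_max_left _ _) [],
              pvGoA_irrel hierarchy (f+1) (max fv (f+1)) t hS (le_max_right _ _) []]
        have hupd : PySem.Set.update R (pvGoA hierarchy (f+1) t []) = R := by
          rw [hirr]; exact pvUpdate_of_subset R _ hsubR
        have hcb : PySem.Set.contains V t = true := (PySem.Set.contains_iff V t).mpr hv
        refine ⟨1, V, le_rfl, by omega, fun v hv => hv, by rw [hupd]; exact hInv, ?_⟩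
        intro fb
        rw [pvGoB_succ, hcb, hupd]
        simp
    · have hcb : PySem.Set.contains V t = false := by
        cases hcb2 : PySem.Set.contains V t with
        | false => rfl
        | true => exact absurd ((PySem.Set.contains_iff V t).mp hcb2) hv
      by_cases hc : pvChildren hierarchy t = []
      · -- leaf: add it to result and to visited
        have hleaf : pvGoA hierarchy (f+1) t [] = [t] := by
          rw [pvGoA_succ, if_pos hc]; rfl
        have hupd : PySem.Set.update R (pvGoA hierarchy (f+1) t []) = PySem.Set.add R t := by
          rw [hleaf]; rfl
        refine ⟨1, PySem.Set.add V t, le_rfl, ?_, ?_, ?_, ?_⟩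
        · have := pvPhi_mono hierarchy V (PySem.Set.add V t)
            (fun x hx => (PySem.Set.mem_add V t x).mpr (Or.inl hx))
          omega
        · exact fun v hvm => (PySem.Set.mem_add V t v).mpr (Or.inl hvm)
        · rw [hupd]
          intro v hvm
          rcases (PySem.Set.mem_add V t v).mp hvm with hvm | rfl
          · rcases hInv v hvm with hg | ⟨fv, hfv, hsubR⟩
            · exact Or.inl hg
            · exact Or.inr ⟨fv, hfv, fun x hx => (PySem.Set.mem_add R t x).mpr (Or.inl (hsubR x hx))⟩
          · refine Or.inr ⟨f+1, Or.inl hc, ?_⟩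
            rw [hleaf]
            intro x hx
            rw [List.mem_singleton] at hx
            subst hx
            exact (PySem.Set.mem_add R x x).mpr (Or.inr rfl)
        · intro fb
          rw [pvGoB_succ, hcb, hupd]
          simp [hc]
      · -- internal node: push the children, then process them with the fold lemma
        rcases hS with hS' | hCs
        · exact absurd hS' hc
        have hGs' : ∀ c ∈ pvChildren hierarchy t, ∀ g ∈ (t :: G), ¬ pvReaches hierarchy c g := by
          intro c hcm g hgm hr
          rcases List.mem_cons.mp hgm with rfl | hgm
          · exact hAc g (pvReaches.refl g) c hcm hr
          · exact hG g hgm (pvReaches.step hcm hr)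
        have hInv' : pvInv hierarchy (t :: G) (PySem.Set.add V t) R := by
          intro v hvm
          rcases (PySem.Set.mem_add V t v).mp hvm with hvm | rfl
          · rcases hInv v hvm with hg | hr
            · exact Or.inl (List.mem_cons.mpr (Or.inr hg))
            · exact Or.inr hr
          · exact Or.inl (List.mem_cons.mpr (Or.inl rfl))
        obtain ⟨cc, V2, hphi2, hsub2, hInv2, hrun2⟩ :=
          fold (pvChildren hierarchy t) (t :: G) (PySem.Set.add V t) R rest hCs
            (fun c hcm u hru d hd hrd => hAc u (pvReaches.step hcm hru) d hd hrd)
            hGs' hInv'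
        have hkey : PySem.Set.update R (pvGoA hierarchy (f+1) t [])
            = (pvChildren hierarchy t).foldl
                (fun r c => PySem.Set.update r (pvGoA hierarchy f c [])) R := by
          have e1 : pvGoA hierarchy (f+1) t []
              = (pvChildren hierarchy t).foldl
                  (fun d c => PySem.Set.update d (pvGoA hierarchy f c [])) [] := by
            rw [pvGoA_succ, if_neg hc]
            exact PySem.List.foldl_congr_mem _ _ _ [] (fun acc c hcm => by
              rw [pvGoA_update_form hierarchy f c (hCs c hcm) acc, pvUpdate_idem])
          rw [e1]
          exact (pvFoldl_update_hoist _ _ R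
            (fun c hcm => pvGoA_nodup hierarchy f c [] List.nodup_nil)).symm
        have hkeymem : t ∈ hierarchy.map Prod.fst := pvChildren_ne_nil_mem_keys hierarchy t hc
        have hdrop := pvPhi_drop hierarchy V t hv hkeymem
        refine ⟨1 + cc, V2, by omega, by omega, ?_, ?_, ?_⟩
        · exact fun v hvm => hsub2 v ((PySem.Set.mem_add V t v).mpr (Or.inl hvm))
        · rw [hkey]
          intro v hvm
          rcases hInv2 v hvm with hg | hr
          · rcases List.mem_cons.mp hg with rfl | hg
            · refine Or.inr ⟨f+1, Or.inr hCs, ?_⟩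
              intro x hx
              have : x ∈ PySem.Set.update R (pvGoA hierarchy (f+1) v []) :=
                (PySem.Set.mem_update R _ x).mpr (Or.inr hx)
              rw [hkey] at this
              exact this
            · exact Or.inl hg
          · exact Or.inr hr
        · intro fb
          have e0 : fb + (1 + cc) = (fb + cc) + 1 := by omega
          rw [e0, pvGoB_succ, hcb, hkey]
          simp only [if_neg hc, Bool.false_eq_true, if_false]
          exact hrun2 fb

-- the B-side fuel is at least 1 + the initial potential
lemma pvPhi_nil_le (hierarchy : List (String × List String)) :
    ∀ (n : Nat), hierarchy.foldl (fun a p => a + (p.2.length + 1)) n = n + pvPhi hierarchy [] := by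
  induction hierarchy with
  | nil => intro n; simp [pvPhi]
  | cons p l ih =>
    intro n
    simp only [List.foldl_cons, pvPhi]
    rw [ih (n + (p.2.length + 1)), if_neg (List.not_mem_nil)]
    omega

-- core equivalence on a duplicate-free accumulator
lemma pvMain (hierarchy : List (String × List String)) (term_id : String) (d0 : List String)
    (hacy : ∀ u ∈ pvReach hierarchy hierarchy.length term_id,
      ∀ c ∈ pvChildren hierarchy u, u ∉ pvReach hierarchy hierarchy.length c) :
    pvGoA hierarchy (hierarchy.length + 1) term_id d0
      = pvGoB hierarchy (1 + hierarchy.foldl (fun a p => a + (p.2.length + 1)) 0)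
          [term_id] [] d0 := by
  have hSuff := pvSuff_term hierarchy term_id hacy
  have hAc := pvAcyc_below hierarchy term_id hacy
  obtain ⟨c, V', hc1, hphi, hsub, hInv, hrun⟩ :=
    pvSim hierarchy (hierarchy.length + 1) term_id [] [] d0 [] hSuff hAc
      (by intro g hg; simp at hg) (by intro v hv; simp at hv)
  have hFB : c ≤ 1 + hierarchy.foldl (fun a p => a + (p.2.length + 1)) 0 := by
    rw [pvPhi_nil_le hierarchy 0]
    omega
  have e0 : 1 + hierarchy.foldl (fun a p => a + (p.2.length + 1)) 0
      = (1 + hierarchy.foldl (fun a p => a + (p.2.length + 1)) 0 - c) + c := by omega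
  rw [e0, hrun _, pvGoB_nil, pvGoA_update_form hierarchy (hierarchy.length + 1) term_id hSuff d0]

-- ===== VERDICT (by name: the statement is the Claim_ definition above) =====
theorem get_bottom_descendants_spec : Claim_equal_get_bottom_descendants := by
  intro hierarchy term_id descendants _ hPre
  obtain ⟨hnd, hacy⟩ := hPre
  unfold Spec_get_bottom_descendants get_bottom_descendants get_bottom_descendants_alt
  cases descendants with
  | none => exact pvMain hierarchy term_id [] hacy
  | some ds =>
    have hnd' : ds.Nodup := by simpa using hnd
    show pvGoA hierarchy (hierarchy.length + 1) term_id ds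
      = pvGoB hierarchy (1 + hierarchy.foldl (fun a p => a + (p.2.length + 1)) 0)
          [term_id] [] (PySem.Set.ofList ds)
    rw [PySem.Set.ofList_eq_self_of_nodup ds hnd']
    exact pvMain hierarchy term_id ds hacy

theorem get_bottom_descendants_raises : Claim_raises_get_bottom_descendants := by
  unfold Claim_raises_get_bottom_descendants
  exact ⟨fun h t d _ hr hp => hr hp.2, by decide⟩

-- self-check: at the raise witness (a one-node cycle) B's port really returns []
theorem pvRaiseWitness_get_bottom_descendants_ok :
    get_bottom_descendants_alt (pvRaiseWitness_get_bottom_descendants.1)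
      (pvRaiseWitness_get_bottom_descendants.2.1) (pvRaiseWitness_get_bottom_descendants.2.2)
      = pvRaiseWitnessOut_get_bottom_descendants :=
  get_bottom_descendants_raises.2.2.2
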